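-- pv_equiv track=rewrite | github.com/xyyLiang/translator | count_cj_complex.py | analyze_line_distribution
-- ===== SOURCE A (Python) =====
-- def analyze_line_distribution(file_line_counts):
--     distribution = {
--         "1-4 lines": 0,
--         "5-10 lines": 0,
--         "11-20 lines": 0,
--         "21-50 lines": 0,
--         "51+ lines": 0
--     }
--     for line_count in file_line_counts.values():
--         if line_count <= 4:
--             distribution["1-4 lines"] += 1
--         elif line_count <= 10:
--             distribution["5-10 lines"] += 1
--         elif line_count <= 20:
--             distribution["11-20 lines"] += 1
--         elif line_count <= 50:
--             distribution["21-50 lines"] += 1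
--         else:
--             distribution["51+ lines"] += 1
--     return distribution
-- ===== SOURCE B (Python) =====
-- def analyze_line_distribution(file_line_counts):
--     # Staged cumulative-threshold counts, then differencing: no per-element
--     # bucketing loop at all.
--     values = list(file_line_counts.values())
--     c4 = sum(1 for v in values if v <= 4)
--     c10 = sum(1 for v in values if v <= 10)
--     c20 = sum(1 for v in values if v <= 20)
--     c50 = sum(1 for v in values if v <= 50)
--     return {
--         "1-4 lines": c4,
--         "5-10 lines": c10 - c4,
--         "11-20 lines": c20 - c10,
--         "21-50 lines": c50 - c20,
--         "51+ lines": len(values) - c50,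
--     }
-- ===== Notes on version B (the rewrite author's own statement) =====
-- stated objective: alternative
-- what changed: Replaces the single pass that routes each value through an if-elif chain into a mutable dict with staged cumulative threshold counts (how many values are <= 4, <= 10, <= 20, <= 50) whose pairwise differences give the bucket sizes, assembling the result dict once at the end.
import Mathlib
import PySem

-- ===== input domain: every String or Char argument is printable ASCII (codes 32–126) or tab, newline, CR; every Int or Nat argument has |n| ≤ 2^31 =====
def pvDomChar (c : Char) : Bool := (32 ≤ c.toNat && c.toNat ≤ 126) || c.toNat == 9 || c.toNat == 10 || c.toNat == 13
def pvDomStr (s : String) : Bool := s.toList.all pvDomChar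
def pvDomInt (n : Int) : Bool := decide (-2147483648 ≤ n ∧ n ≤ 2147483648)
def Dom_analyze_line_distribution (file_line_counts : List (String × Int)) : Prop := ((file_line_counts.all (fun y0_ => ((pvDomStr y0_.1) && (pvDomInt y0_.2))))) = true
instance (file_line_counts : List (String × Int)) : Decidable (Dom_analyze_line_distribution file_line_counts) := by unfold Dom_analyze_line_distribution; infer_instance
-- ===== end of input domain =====

-- B replaces A's per-element if-elif bucketing into a mutable dict with staged
-- cumulative threshold counts whose differences are the bucket sizes (alternative).

-- ===== PORT A =====
-- one loop iteration: the if/elif chain incrementing the matching dict entry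

-- one loop iteration: the if/elif chain incrementing the matching dict entry
def pvStepA (d : PySem.Dict String Int) (line_count : Int) : PySem.Dict String Int :=
  if line_count ≤ 4 then d.insert "1-4 lines" (d.getD "1-4 lines" 0 + 1)
  else if line_count ≤ 10 then d.insert "5-10 lines" (d.getD "5-10 lines" 0 + 1)
  else if line_count ≤ 20 then d.insert "11-20 lines" (d.getD "11-20 lines" 0 + 1)
  else if line_count ≤ 50 then d.insert "21-50 lines" (d.getD "21-50 lines" 0 + 1)
  else d.insert "51+ lines" (d.getD "51+ lines" 0 + 1)

def analyze_line_distribution (file_line_counts : List (String × Int)) : List (String × Int) :=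
  let distribution : PySem.Dict String Int :=
    PySem.Dict.ofList [("1-4 lines", 0), ("5-10 lines", 0), ("11-20 lines", 0), ("21-50 lines", 0), ("51+ lines", 0)]
  ((file_line_counts.map Prod.snd).foldl pvStepA distribution).items

-- ===== PORT B =====
-- sum(1 for v in values if v <= b) is ported as List.countP; the returned dict
-- literal has five distinct keys, so it is its own association list.
def analyze_line_distribution_alt (file_line_counts : List (String × Int)) : List (String × Int) :=
  let values := file_line_counts.map Prod.snd
  let c4 : Int := values.countP (fun v => decide (v ≤ 4))
  let c10 : Int := values.countP (fun v => decide (v ≤ 10))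
  let c20 : Int := values.countP (fun v => decide (v ≤ 20))
  let c50 : Int := values.countP (fun v => decide (v ≤ 50))
  [("1-4 lines", c4), ("5-10 lines", c10 - c4), ("11-20 lines", c20 - c10),
   ("21-50 lines", c50 - c20), ("51+ lines", (values.length : Int) - c50)]

-- ===== PRECONDITION & SPEC =====
def Spec_analyze_line_distribution (file_line_counts : List (String × Int)) (out : List (String × Int)) : Prop := out = analyze_line_distribution_alt file_line_counts
instance (file_line_counts : List (String × Int)) (out : List (String × Int)) : Decidable (Spec_analyze_line_distribution file_line_counts out) := by unfold Spec_analyze_line_distribution; infer_instance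

-- ===== CLAIM =====
def Claim_equal_analyze_line_distribution : Prop := ∀ (file_line_counts : List (String × Int)), Dom_analyze_line_distribution file_line_counts → Spec_analyze_line_distribution file_line_counts (analyze_line_distribution file_line_counts)

-- ===== LEMMAS AND PROOFS =====
-- the five disjoint bucket counts, as Ints
def pvC1 (vs : List Int) : Int := vs.countP (fun v => decide (v ≤ 4))
def pvC2 (vs : List Int) : Int := vs.countP (fun v => decide (4 < v ∧ v ≤ 10))
def pvC3 (vs : List Int) : Int := vs.countP (fun v => decide (10 < v ∧ v ≤ 20))
def pvC4 (vs : List Int) : Int := vs.countP (fun v => decide (20 < v ∧ v ≤ 50))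
def pvC5 (vs : List Int) : Int := vs.countP (fun v => decide (50 < v))

lemma pv_fold (vs : List Int) (a b c d e : Int) :
    vs.foldl pvStepA (PySem.Dict.mk [("1-4 lines", a), ("5-10 lines", b), ("11-20 lines", c), ("21-50 lines", d), ("51+ lines", e)])
      = PySem.Dict.mk [("1-4 lines", a + pvC1 vs), ("5-10 lines", b + pvC2 vs),
          ("11-20 lines", c + pvC3 vs), ("21-50 lines", d + pvC4 vs), ("51+ lines", e + pvC5 vs)] := by
  induction vs generalizing a b c d e with
  | nil => simp [pvC1, pvC2, pvC3, pvC4, pvC5]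
  | cons v vs ih =>
      by_cases h1 : v ≤ 4
      · rw [List.foldl_cons,
          show pvStepA (PySem.Dict.mk [("1-4 lines", a), ("5-10 lines", b), ("11-20 lines", c), ("21-50 lines", d), ("51+ lines", e)]) v
            = PySem.Dict.mk [("1-4 lines", a + 1), ("5-10 lines", b), ("11-20 lines", c), ("21-50 lines", d), ("51+ lines", e)] from by
              simp [pvStepA, h1, PySem.Dict.insert, PySem.Dict.getD, PySem.Dict.get?], ih]
        simp [pvC1, pvC2, pvC3, pvC4, pvC5, h1, show ¬(4 < v) by omega,
          show ¬(10 < v) by omega, show ¬(20 < v) by omega, show ¬(50 < v) by omega]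
        omega
      · by_cases h2 : v ≤ 10
        · rw [List.foldl_cons,
            show pvStepA (PySem.Dict.mk [("1-4 lines", a), ("5-10 lines", b), ("11-20 lines", c), ("21-50 lines", d), ("51+ lines", e)]) v
              = PySem.Dict.mk [("1-4 lines", a), ("5-10 lines", b + 1), ("11-20 lines", c), ("21-50 lines", d), ("51+ lines", e)] from by
                simp [pvStepA, h1, h2, PySem.Dict.insert, PySem.Dict.getD, PySem.Dict.get?], ih]
          simp [pvC1, pvC2, pvC3, pvC4, pvC5, h1, h2, show (4 < v) by omega,
            show ¬(10 < v) by omega, show ¬(20 < v) by omega, show ¬(50 < v) by omega]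
          omega
        · by_cases h3 : v ≤ 20
          · rw [List.foldl_cons,
              show pvStepA (PySem.Dict.mk [("1-4 lines", a), ("5-10 lines", b), ("11-20 lines", c), ("21-50 lines", d), ("51+ lines", e)]) v
                = PySem.Dict.mk [("1-4 lines", a), ("5-10 lines", b), ("11-20 lines", c + 1), ("21-50 lines", d), ("51+ lines", e)] from by
                  simp [pvStepA, h1, h2, h3, PySem.Dict.insert, PySem.Dict.getD, PySem.Dict.get?], ih]
            simp [pvC1, pvC2, pvC3, pvC4, pvC5, h1, h2, h3, show (4 < v) by omega,
              show (10 < v) by omega, show ¬(20 < v) by omega, show ¬(50 < v) by omega]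
            omega
          · by_cases h4 : v ≤ 50
            · rw [List.foldl_cons,
                show pvStepA (PySem.Dict.mk [("1-4 lines", a), ("5-10 lines", b), ("11-20 lines", c), ("21-50 lines", d), ("51+ lines", e)]) v
                  = PySem.Dict.mk [("1-4 lines", a), ("5-10 lines", b), ("11-20 lines", c), ("21-50 lines", d + 1), ("51+ lines", e)] from by
                    simp [pvStepA, h1, h2, h3, h4, PySem.Dict.insert, PySem.Dict.getD, PySem.Dict.get?], ih]
              simp [pvC1, pvC2, pvC3, pvC4, pvC5, h1, h2, h3, h4, show (4 < v) by omega,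
                show (10 < v) by omega, show (20 < v) by omega, show ¬(50 < v) by omega]
              omega
            · rw [List.foldl_cons,
                show pvStepA (PySem.Dict.mk [("1-4 lines", a), ("5-10 lines", b), ("11-20 lines", c), ("21-50 lines", d), ("51+ lines", e)]) v
                  = PySem.Dict.mk [("1-4 lines", a), ("5-10 lines", b), ("11-20 lines", c), ("21-50 lines", d), ("51+ lines", e + 1)] from by
                    simp [pvStepA, h1, h2, h3, h4, PySem.Dict.insert, PySem.Dict.getD, PySem.Dict.get?], ih]
              simp [pvC1, pvC2, pvC3, pvC4, pvC5, h1, h2, h3, h4, show (4 < v) by omega,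
                show (10 < v) by omega, show (20 < v) by omega, show (50 < v) by omega]
              omega

lemma pv_split10 (vs : List Int) :
    (vs.countP (fun v => decide (v ≤ 10)) : Int) = pvC1 vs + pvC2 vs := by
  induction vs with
  | nil => simp [pvC1, pvC2]
  | cons v vs ih =>
      by_cases h4 : v ≤ 4 <;> by_cases h10 : v ≤ 10 <;>
        simp [pvC1, pvC2, h4, h10, show ((4:Int) < v) ↔ ¬(v ≤ 4) by omega] at ih ⊢ <;>
        omega

lemma pv_split20 (vs : List Int) :
    (vs.countP (fun v => decide (v ≤ 20)) : Int) = (vs.countP (fun v => decide (v ≤ 10)) : Int) + pvC3 vs := by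
  induction vs with
  | nil => simp [pvC3]
  | cons v vs ih =>
      by_cases h10 : v ≤ 10 <;> by_cases h20 : v ≤ 20 <;>
        simp [pvC3, h10, h20, show ((10:Int) < v) ↔ ¬(v ≤ 10) by omega] at ih ⊢ <;>
        omega

lemma pv_split50 (vs : List Int) :
    (vs.countP (fun v => decide (v ≤ 50)) : Int) = (vs.countP (fun v => decide (v ≤ 20)) : Int) + pvC4 vs := by
  induction vs with
  | nil => simp [pvC4]
  | cons v vs ih =>
      by_cases h20 : v ≤ 20 <;> by_cases h50 : v ≤ 50 <;>
        simp [pvC4, h20, h50, show ((20:Int) < v) ↔ ¬(v ≤ 20) by omega] at ih ⊢ <;>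
        omega

lemma pv_len (vs : List Int) :
    (vs.length : Int) = (vs.countP (fun v => decide (v ≤ 50)) : Int) + pvC5 vs := by
  induction vs with
  | nil => simp [pvC5]
  | cons v vs ih =>
      by_cases h50 : v ≤ 50 <;>
        simp [pvC5, h50, show ((50:Int) < v) ↔ ¬(v ≤ 50) by omega] at ih ⊢ <;>
        omega

lemma pv_final (fcs : List (String × Int)) :
    analyze_line_distribution fcs = analyze_line_distribution_alt fcs := by
  unfold analyze_line_distribution analyze_line_distribution_alt
  show (List.foldl pvStepA (PySem.Dict.ofList [("1-4 lines", 0), ("5-10 lines", 0), ("11-20 lines", 0), ("21-50 lines", 0), ("51+ lines", 0)]) (fcs.map Prod.snd)).items = _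
  rw [show PySem.Dict.ofList [("1-4 lines", (0:Int)), ("5-10 lines", 0), ("11-20 lines", 0), ("21-50 lines", 0), ("51+ lines", 0)]
      = PySem.Dict.mk [("1-4 lines", 0), ("5-10 lines", 0), ("11-20 lines", 0), ("21-50 lines", 0), ("51+ lines", 0)] from by decide,
    pv_fold]
  have h10 := pv_split10 (fcs.map Prod.snd)
  have h20 := pv_split20 (fcs.map Prod.snd)
  have h50 := pv_split50 (fcs.map Prod.snd)
  have hlen := pv_len (fcs.map Prod.snd)
  have e1 : ((fcs.map Prod.snd).countP (fun v => decide (v ≤ 4)) : Int) = pvC1 (fcs.map Prod.snd) := rfl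
  simp only [List.cons.injEq, Prod.mk.injEq, true_and, and_true]
  omega

-- ===== VERDICT =====
theorem analyze_line_distribution_spec : Claim_equal_analyze_line_distribution := by
  intro fcs _
  exact pv_final fcs
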